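-- pv_equiv track=rewrite | github.com/JaeyoonCheon/Algorithm | BOJ/Bruteforce/14889.py | calculatePower
-- ===== SOURCE A (Python) =====
-- def calculatePower(N, power, start, link):
--     startSum = 0
--     linkSum = 0
--     for i in range(int((N/2)-1)):
--         for j in range(i+1, int(N/2)):
--             startSum += power[start[i]][start[j]] + power[start[j]][start[i]]
--             linkSum += power[link[i]][link[j]] + power[link[j]][link[i]]
--
--     diff = abs(startSum - linkSum)
--     return diff
-- ===== SOURCE B (Python) =====
-- def calculatePower(N, power, start, link):
--     # Recursive decomposition over the member lists themselves: slice out each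
--     # team, then peel the first member and add its (both-direction) cross terms
--     # against the rest -- no index arithmetic, one helper applied to each team.
--     def cross(x, rest):
--         return sum(power[x][y] + power[y][x] for y in rest)
--
--     def teamScore(members):
--         if not members:
--             return 0
--         return cross(members[0], members[1:]) + teamScore(members[1:])
--
--     M = N // 2
--     if M <= 0:
--         return 0
--     return abs(teamScore(start[:M]) - teamScore(link[:M]))
-- ===== Notes on version B (the rewrite author's own statement) =====
-- stated objective: alternative
-- what changed: Replaced A's nested index loops over the upper triangle with a structural recursion on the sliced member lists: a teamScore helper peels the first member, sums its cross terms against the remaining members, and recurses on the tail; the final result is the abs-difference of the two team scores.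
import Mathlib
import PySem

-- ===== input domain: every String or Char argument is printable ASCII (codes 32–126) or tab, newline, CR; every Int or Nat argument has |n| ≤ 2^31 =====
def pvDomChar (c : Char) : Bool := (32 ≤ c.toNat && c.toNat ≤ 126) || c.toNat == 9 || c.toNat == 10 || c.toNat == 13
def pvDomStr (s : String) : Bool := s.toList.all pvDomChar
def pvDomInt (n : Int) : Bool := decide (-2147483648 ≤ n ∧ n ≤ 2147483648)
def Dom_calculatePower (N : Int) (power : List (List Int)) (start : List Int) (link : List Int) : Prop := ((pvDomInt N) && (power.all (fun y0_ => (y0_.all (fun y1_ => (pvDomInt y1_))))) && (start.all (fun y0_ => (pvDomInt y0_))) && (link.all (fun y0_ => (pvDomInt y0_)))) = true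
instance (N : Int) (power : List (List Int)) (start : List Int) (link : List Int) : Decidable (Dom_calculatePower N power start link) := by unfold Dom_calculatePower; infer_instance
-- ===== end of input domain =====

-- B replaces A's nested index loops over the upper triangle by a structural recursion
-- on the sliced member lists: teamScore peels the first member, adds its cross terms
-- against the rest, and recurses (objective: alternative decomposition, same cost).

-- ===== PORT A =====
-- power[s[i]][s[j]] with default 0; Pre_ guarantees every visited access is in range.
def pvCell (power : List (List Int)) (s : List Int) (i j : Int) : Int :=
  PySem.List.pyGetD (PySem.List.pyGetD power (PySem.List.pyGetD s i 0) []) (PySem.List.pyGetD s j 0) 0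

-- int((N/2)-1) = (N-2).tdiv 2 and int(N/2) = N.tdiv 2 exactly (Python float halves of
-- |N| ≤ 2^31 are exact and int truncates toward zero).
def calculatePower (N : Int) (power : List (List Int)) (start : List Int) (link : List Int) : Int :=
  let r := (PySem.List.pyRange 0 ((N - 2).tdiv 2) 1).foldl (fun (acc : Int × Int) i =>
    (PySem.List.pyRange (i + 1) (N.tdiv 2) 1).foldl (fun (acc : Int × Int) j =>
      (acc.1 + (pvCell power start i j + pvCell power start j i),
       acc.2 + (pvCell power link i j + pvCell power link j i))) acc) (0, 0)
  |r.1 - r.2|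

-- ===== PORT B =====
-- power[x][y] for member values x, y (default 0; Pre_ keeps visited accesses in range).
def pvAt (power : List (List Int)) (x y : Int) : Int :=
  PySem.List.pyGetD (PySem.List.pyGetD power x []) y 0

-- cross(x, rest) = sum(power[x][y] + power[y][x] for y in rest)
def pvCross (power : List (List Int)) (x : Int) (rest : List Int) : Int :=
  (rest.map (fun y => pvAt power x y + pvAt power y x)).sum

-- teamScore(members): empty -> 0; else cross(head, tail) + teamScore(tail)
def pvTeamScore (power : List (List Int)) : List Int → Int
  | [] => 0
  | x :: rest => pvCross power x rest + pvTeamScore power rest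

def calculatePower_alt (N : Int) (power : List (List Int)) (start : List Int) (link : List Int) : Int :=
  let M := N.fdiv 2
  if M ≤ 0 then 0
  else |pvTeamScore power (PySem.List.slice start none (some M))
        - pvTeamScore power (PySem.List.slice link none (some M))|

-- ===== PRECONDITION & SPEC =====
-- Pre_: exactly the inputs on which A raises no IndexError: with M = int(N/2), either
-- M <= 1 (the loops run zero iterations) or start/link have at least M entries and every
-- ordered pair of entries at distinct positions below M gives an in-range (possibly
-- negative, Python-wrapped) row/column access into power.
def pvPairOk (power : List (List Int)) (s : List Int) : Prop :=
  ∀ p ∈ s.zipIdx, ∀ q ∈ s.zipIdx, p.2 ≠ q.2 →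
    (((PySem.List.pyGet? power p.1).bind fun row => PySem.List.pyGet? row q.1).isSome = true)

def Pre_calculatePower (N : Int) (power : List (List Int)) (start : List Int) (link : List Int) : Prop :=
  (N.tdiv 2).toNat ≤ 1 ∨
  ((N.tdiv 2).toNat ≤ start.length ∧ (N.tdiv 2).toNat ≤ link.length ∧
   pvPairOk power (start.take (N.tdiv 2).toNat) ∧ pvPairOk power (link.take (N.tdiv 2).toNat))
instance (N : Int) (power : List (List Int)) (start : List Int) (link : List Int) : Decidable (Pre_calculatePower N power start link) := by unfold Pre_calculatePower pvPairOk; infer_instance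

def pvWitness_calculatePower : Int × List (List Int) × List Int × List Int :=
  (4, [[0, 3], [5, 0]], [0, 1], [1, 0])

def Spec_calculatePower (N : Int) (power : List (List Int)) (start : List Int) (link : List Int) (out : Int) : Prop := out = calculatePower_alt N power start link
instance (N : Int) (power : List (List Int)) (start : List Int) (link : List Int) (out : Int) : Decidable (Spec_calculatePower N power start link out) := by unfold Spec_calculatePower; infer_instance

-- ===== CLAIM (what is proved, stated in full; the proofs are below) =====
def Claim_equal_calculatePower : Prop := ∀ (N : Int) (power : List (List Int)) (start : List Int) (link : List Int), Dom_calculatePower N power start link → Pre_calculatePower N power start link → Spec_calculatePower N power start link (calculatePower N power start link)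

-- ===== LEMMAS AND PROOFS =====

theorem pvFoldPair (L : List Int) (u v : Int → Int) (init : Int × Int) :
    L.foldl (fun acc x => (acc.1 + u x, acc.2 + v x)) init
      = (init.1 + (L.map u).sum, init.2 + (L.map v).sum) := by
  induction L generalizing init with
  | nil => simp
  | cons x xs ih => simp [ih]; constructor <;> ring

-- A's fold over both teams, written as a pair of triangular map-sums.
theorem pvFoldTri (K b : Int) (F G : Int → Int → Int) :
    ((PySem.List.pyRange 0 K 1).foldl (fun (acc : Int × Int) i =>
        (PySem.List.pyRange (i + 1) b 1).foldl (fun (acc : Int × Int) j =>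
          (acc.1 + (F i j + F j i), acc.2 + (G i j + G j i))) acc) ((0 : Int), (0 : Int)))
      = (((PySem.List.pyRange 0 K 1).map
            (fun i => ((PySem.List.pyRange (i + 1) b 1).map (fun j => F i j + F j i)).sum)).sum,
         ((PySem.List.pyRange 0 K 1).map
            (fun i => ((PySem.List.pyRange (i + 1) b 1).map (fun j => G i j + G j i)).sum)).sum) := by
  have h : (fun (acc : Int × Int) i =>
      (PySem.List.pyRange (i + 1) b 1).foldl (fun (acc : Int × Int) j =>
        (acc.1 + (F i j + F j i), acc.2 + (G i j + G j i))) acc)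
      = fun (acc : Int × Int) i =>
        (acc.1 + ((PySem.List.pyRange (i + 1) b 1).map (fun j => F i j + F j i)).sum,
         acc.2 + ((PySem.List.pyRange (i + 1) b 1).map (fun j => G i j + G j i)).sum) := by
    funext acc i
    exact pvFoldPair _ _ _ _
  rw [h, pvFoldPair]
  simp

theorem pvTriOuter (f : Int → Int → Int) (m : Nat) (hm : 1 ≤ m) :
    ((PySem.List.pyRange 0 ((m : Int) - 1) 1).map
        (fun i => ((PySem.List.pyRange (i + 1) (m : Int) 1).map (fun j => f i j + f j i)).sum)).sum
      = ((PySem.List.pyRange 0 (m : Int) 1).map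
        (fun i => ((PySem.List.pyRange (i + 1) (m : Int) 1).map (fun j => f i j + f j i)).sum)).sum := by
  obtain ⟨k, rfl⟩ : ∃ k, m = k + 1 := ⟨m - 1, by omega⟩
  push_cast
  have hk : (k : Int) + 1 - 1 = (k : Int) := by ring
  rw [hk, PySem.List.pyRange_one_succ_right (a := 0) (b := (k : Int)) (by positivity)]
  simp [PySem.List.pyRange_one_eq_nil]

theorem pvTeamScore_append (p : List (List Int)) (L : List Int) (x : Int) :
    pvTeamScore p (L ++ [x]) = pvTeamScore p L + pvCross p x L := by
  induction L with
  | nil => simp [pvTeamScore, pvCross]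
  | cons a L ih =>
    simp only [List.cons_append, pvTeamScore, ih, pvCross, List.map_append, List.sum_append,
      List.map_cons, List.map_nil, List.sum_cons, List.sum_nil]
    ring

-- The triangular both-direction index sum over s equals teamScore of the first m entries.
theorem pvTriTeam (p : List (List Int)) (s : List Int) (m : Nat) :
    ((PySem.List.pyRange 0 (m : Int) 1).map
        (fun i => ((PySem.List.pyRange (i + 1) (m : Int) 1).map
          (fun j => pvCell p s i j + pvCell p s j i)).sum)).sum
      = pvTeamScore p ((PySem.List.pyRange 0 (m : Int) 1).map
          (fun i => PySem.List.pyGetD s i 0)) := by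
  induction m with
  | zero => simp [PySem.List.pyRange_one_eq_nil, pvTeamScore]
  | succ m ih =>
    have hsplit : PySem.List.pyRange 0 ((m : Int) + 1) = PySem.List.pyRange 0 (m : Int) ++ [(m : Int)] :=
      PySem.List.pyRange_one_succ_right (by positivity)
    have hinner : ∀ i ∈ PySem.List.pyRange 0 (m : Int),
        ((PySem.List.pyRange (i + 1) ((m : Int) + 1)).map (fun j => pvCell p s i j + pvCell p s j i)).sum
          = ((PySem.List.pyRange (i + 1) (m : Int)).map (fun j => pvCell p s i j + pvCell p s j i)).sum
            + (pvCell p s i (m : Int) + pvCell p s (m : Int) i) := by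
      intro i hi
      rw [PySem.List.mem_pyRange_one] at hi
      rw [PySem.List.pyRange_one_succ_right (by omega)]
      simp
    have hlast : ((PySem.List.pyRange ((m : Int) + 1) ((m : Int) + 1)).map
        (fun j => pvCell p s (m : Int) j + pvCell p s j (m : Int))).sum = 0 := by
      simp [PySem.List.pyRange_one_eq_nil]
    push_cast
    rw [hsplit]
    simp only [List.map_append, List.map_cons, List.map_nil, List.sum_append, List.sum_cons,
      List.sum_nil, add_zero]
    rw [List.map_congr_left hinner, hlast, PySem.List.sum_map_add_int, ih,
      pvTeamScore_append]
    have hcross : pvCross p (PySem.List.pyGetD s (m : Int) 0)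
        ((PySem.List.pyRange 0 (m : Int) 1).map (fun i => PySem.List.pyGetD s i 0))
        = ((PySem.List.pyRange 0 (m : Int) 1).map
            (fun i => pvCell p s i (m : Int) + pvCell p s (m : Int) i)).sum := by
      unfold pvCross
      rw [List.map_map]
      refine congrArg List.sum (List.map_congr_left ?_)
      intro i _
      show pvAt p (PySem.List.pyGetD s (m : Int) 0) (PySem.List.pyGetD s i 0)
            + pvAt p (PySem.List.pyGetD s i 0) (PySem.List.pyGetD s (m : Int) 0)
          = pvCell p s i (m : Int) + pvCell p s (m : Int) i
      unfold pvAt pvCell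
      ring
    rw [hcross]
    ring

-- The first-m index view of a list: map pyGetD over range 0 m is take m (m within bounds).
theorem pvTakeMap (s : List Int) (m : Nat) (hm : m ≤ s.length) :
    (PySem.List.pyRange 0 (m : Int) 1).map (fun i => PySem.List.pyGetD s i 0) = s.take m := by
  have hlen : (s.take m).length = m := by simp [hm]
  have hbase := PySem.List.map_pyGetD_pyRange_zero (xs := s.take m) (d := (0:Int))
  rw [PySem.List.len_eq, hlen] at hbase
  rw [← hbase]
  refine List.map_congr_left ?_
  intro i hi
  rw [PySem.List.mem_pyRange_one] at hi
  obtain ⟨k, rfl⟩ : ∃ k : Nat, i = (k : Int) := ⟨i.toNat, by omega⟩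
  have hk : k < m := by exact_mod_cast hi.2
  simp [List.getD_eq_getElem?_getD, hk]

theorem pvTeamScore_short (p : List (List Int)) (s : List Int) (h : s.length ≤ 1) :
    pvTeamScore p s = 0 := by
  match s, h with
  | [], _ => rfl
  | [x], _ => simp [pvTeamScore, pvCross]

theorem calculatePower_spec : Claim_equal_calculatePower := by
  intro N power start link _ hPre
  unfold Spec_calculatePower calculatePower calculatePower_alt
  rw [pvFoldTri]
  have hfd : N.fdiv 2 = N / 2 := by rw [Int.fdiv_eq_ediv]; simp
  by_cases hM : N.fdiv 2 ≤ 0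
  · -- fewer than two players: both sides are 0
    rw [hfd] at hM
    have hKn : (N - 2).tdiv 2 ≤ 0 := by
      have h2 : (N - 2).tdiv 2 = -((2 - N).tdiv 2) := by
        rw [← Int.neg_tdiv]; ring_nf
      rw [h2, Int.tdiv_eq_ediv_of_nonneg (by omega)]
      have : 0 ≤ (2 - N) / 2 := Int.ediv_nonneg (by omega) (by omega)
      omega
    rw [if_pos (by rw [hfd]; exact hM), PySem.List.pyRange_one_eq_nil hKn]
    simp
  · -- N ≥ 2; let m = N // 2 = int(N/2)
    rw [if_neg hM]
    rw [hfd] at hM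
    have hN2 : 2 ≤ N := by omega
    have htd : N.tdiv 2 = N / 2 := Int.tdiv_eq_ediv_of_nonneg (by omega)
    obtain ⟨m, hm⟩ : ∃ m : Nat, N / 2 = (m : Int) := ⟨(N / 2).toNat, by omega⟩
    have hm1 : 1 ≤ m := by omega
    have hK : (N - 2).tdiv 2 = (m : Int) - 1 := by
      rw [Int.tdiv_eq_ediv_of_nonneg (by omega)]; omega
    have hslice : ∀ s : List Int,
        PySem.List.slice s none (some (N.fdiv 2)) = s.take m := by
      intro s
      rw [hfd, hm, PySem.List.slice_to_natCast]
    rcases hPre with h1 | ⟨hls, hll, -, -⟩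
    · -- m = 1: empty loops on A's side, single-member teams on B's
      have hm1' : m = 1 := by rw [htd, hm] at h1; omega
      have hK0 : (N - 2).tdiv 2 = 0 := by rw [hK, hm1']; ring
      rw [hK0, PySem.List.pyRange_one_eq_nil (by omega)]
      rw [hslice start, hslice link,
          pvTeamScore_short _ _ (by simp [hm1']),
          pvTeamScore_short _ _ (by simp [hm1'])]
      simp
    · have hls' : m ≤ start.length := by rw [htd, hm] at hls; omega
      have hll' : m ≤ link.length := by rw [htd, hm] at hll; omega
      rw [hK, htd, hm, pvTriOuter _ m hm1, pvTriOuter _ m hm1, pvTriTeam, pvTriTeam,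
          pvTakeMap start m hls', pvTakeMap link m hll',
          hslice start, hslice link]
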